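-- pv_equiv track=rewrite | github.com/xuefenghao5121/PTO-Gromacs | third_party/pto-isa/docs/tools/gen_isa_indexes.py | render_isa_readme_zh
-- ===== SOURCE A (Python) =====
-- from collections import OrderedDict
-- from typing import Dict, List
--
-- CATEGORY_ZH = {
--     "Synchronization": "同步",
--     "Manual / Resource Binding": "手动 / 资源绑定",
--     "Elementwise (Tile-Tile)": "逐元素（Tile-Tile）",
--     "Tile-Scalar / Tile-Immediate": "Tile-标量 / Tile-立即数",
--     "Axis Reduce / Expand": "轴归约 / 扩展",
--     "Padding": "填充",
--     "Memory (GM <-> Tile)": "内存（GM <-> Tile）",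
--     "Matrix Multiply": "矩阵乘",
--     "Data Movement / Layout": "数据搬运 / 布局",
--     "Complex": "复杂指令",
-- }
--
-- def group_by_category(entries: List[Dict[str, object]]) -> OrderedDict[str, List[Dict[str, object]]]:
--     grouped: OrderedDict[str, List[Dict[str, object]]] = OrderedDict()
--     for e in entries:
--         cat = str(e.get("category", "Uncategorized"))
--         grouped.setdefault(cat, []).append(e)
--     return grouped
--
-- def render_isa_readme_zh(entries: List[Dict[str, object]]) -> str:
--     grouped = group_by_category(entries)
--     lines: List[str] = []
--     lines.append('<p align="center">')
--     lines.append('  <img src="../figures/pto_logo.svg" alt="PTO Tile Lib" width="180" />')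
--     lines.append("</p>")
--     lines.append("")
--     lines.append("# PTO ISA 参考")
--     lines.append("")
--     lines.append("本目录是 PTO Tile Lib ISA 的指令参考（每条指令一页）。")
--     lines.append("")
--     lines.append("- 权威来源：`include/pto/common/pto_instr.hpp`")
--     lines.append("- 通用约定（操作数、事件、修饰符）：`docs/isa/conventions_zh.md`")
--     lines.append("")
--     for cat, cat_entries in grouped.items():
--         lines.append(f"## {CATEGORY_ZH.get(cat, cat)}")
--         for e in cat_entries:
--             instr = str(e["instruction"])
--             summary = str(e.get("summary_zh", "")).strip()
--             suffix = f" - {summary}" if summary else ""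
--             lines.append(f"- [{instr}]({instr}_zh.md){suffix}")
--         lines.append("")
--     return "\n".join(lines).rstrip() + "\n"
-- ===== SOURCE B (Python) =====
-- from typing import Dict, List
--
-- CATEGORY_ZH = {
--     "Synchronization": "同步",
--     "Manual / Resource Binding": "手动 / 资源绑定",
--     "Elementwise (Tile-Tile)": "逐元素（Tile-Tile）",
--     "Tile-Scalar / Tile-Immediate": "Tile-标量 / Tile-立即数",
--     "Axis Reduce / Expand": "轴归约 / 扩展",
--     "Padding": "填充",
--     "Memory (GM <-> Tile)": "内存（GM <-> Tile）",
--     "Matrix Multiply": "矩阵乘",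
--     "Data Movement / Layout": "数据搬运 / 布局",
--     "Complex": "复杂指令",
-- }
--
-- HEADER = [
--     '<p align="center">',
--     '  <img src="../figures/pto_logo.svg" alt="PTO Tile Lib" width="180" />',
--     "</p>",
--     "",
--     "# PTO ISA 参考",
--     "",
--     "本目录是 PTO Tile Lib ISA 的指令参考（每条指令一页）。",
--     "",
--     "- 权威来源：`include/pto/common/pto_instr.hpp`",
--     "- 通用约定（操作数、事件、修饰符）：`docs/isa/conventions_zh.md`",
--     "",
-- ]
--
-- def _cat(e: Dict[str, object]) -> str:
--     return str(e.get("category", "Uncategorized"))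
--
-- def _line(e: Dict[str, object]) -> str:
--     instr = str(e["instruction"])
--     summary = str(e.get("summary_zh", "")).strip()
--     return f"- [{instr}]({instr}_zh.md)" + (f" - {summary}" if summary else "")
--
-- def _blocks(rest: List[Dict[str, object]]) -> List[str]:
--     # Recursive extract-group: peel off the first entry's category, emit its
--     # block from the matching entries, recurse on the remainder.
--     if not rest:
--         return []
--     c = _cat(rest[0])
--     same = [e for e in rest if _cat(e) == c]
--     other = [e for e in rest if _cat(e) != c]
--     return ["## " + CATEGORY_ZH.get(c, c)] + [_line(e) for e in same] + [""] + _blocks(other)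
--
-- def render_isa_readme_zh(entries: List[Dict[str, object]]) -> str:
--     return "\n".join(HEADER + _blocks(entries)).rstrip() + "\n"
-- ===== Notes on version B (the rewrite author's own statement) =====
-- stated objective: alternative
-- what changed: Replaces A's one-pass OrderedDict grouping (setdefault+append, then iterate items) by a recursive extract-group scheme: peel off the first remaining entry's category, filter its whole block out of the remaining entries, emit it, and recurse on the leftover entries; no grouping structure is ever built.
import Mathlib
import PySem

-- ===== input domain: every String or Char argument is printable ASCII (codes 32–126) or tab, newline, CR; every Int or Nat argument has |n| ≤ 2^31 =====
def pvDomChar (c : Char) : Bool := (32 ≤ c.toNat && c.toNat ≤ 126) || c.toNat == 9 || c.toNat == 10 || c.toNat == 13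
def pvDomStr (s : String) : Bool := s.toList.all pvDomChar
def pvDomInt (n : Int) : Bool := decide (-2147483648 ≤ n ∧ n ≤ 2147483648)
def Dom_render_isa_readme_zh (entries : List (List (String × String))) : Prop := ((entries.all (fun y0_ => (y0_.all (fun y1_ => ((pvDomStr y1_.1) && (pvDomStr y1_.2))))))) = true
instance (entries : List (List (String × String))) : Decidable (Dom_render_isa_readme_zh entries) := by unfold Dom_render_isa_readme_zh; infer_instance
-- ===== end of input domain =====

-- B replaces A's one-pass OrderedDict grouping with a recursive extract-group scheme:
-- peel off the first entry's category, filter out its block, recurse on the remainder.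

-- ===== PORT A =====
-- shared with the B port because the Python code of these pieces is textually identical in Source A and Source B:
-- the CATEGORY_ZH constant, the fixed header lines, cat extraction and the per-entry line formatter.
def pvCategoryZh : PySem.Dict String String := PySem.Dict.ofList [
  ("Synchronization", "同步"),
  ("Manual / Resource Binding", "手动 / 资源绑定"),
  ("Elementwise (Tile-Tile)", "逐元素（Tile-Tile）"),
  ("Tile-Scalar / Tile-Immediate", "Tile-标量 / Tile-立即数"),
  ("Axis Reduce / Expand", "轴归约 / 扩展"),
  ("Padding", "填充"),
  ("Memory (GM <-> Tile)", "内存（GM <-> Tile）"),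
  ("Matrix Multiply", "矩阵乘"),
  ("Data Movement / Layout", "数据搬运 / 布局"),
  ("Complex", "复杂指令")]

def pvHeader : List String := [
  "<p align=\"center\">",
  "  <img src=\"../figures/pto_logo.svg\" alt=\"PTO Tile Lib\" width=\"180\" />",
  "</p>",
  "",
  "# PTO ISA 参考",
  "",
  "本目录是 PTO Tile Lib ISA 的指令参考（每条指令一页）。",
  "",
  "- 权威来源：`include/pto/common/pto_instr.hpp`",
  "- 通用约定（操作数、事件、修饰符）：`docs/isa/conventions_zh.md`",
  ""]

-- str(e.get("category", "Uncategorized")) — values are strings, str() is the identity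
def pvCat (e : List (String × String)) : String :=
  (PySem.Dict.mk e).getD "category" "Uncategorized"

-- the '- [instr](instr_zh.md){suffix}' line; e["instruction"] is present under Pre_ (getD "" is unreached there)
def pvLine (e : List (String × String)) : String :=
  let instr := ((PySem.Dict.mk e).get? "instruction").getD ""
  let summary := PySem.Str.strip ((PySem.Dict.mk e).getD "summary_zh" "")
  let suffix := if summary = "" then "" else " - " ++ summary
  "- [" ++ instr ++ "](" ++ instr ++ "_zh.md)" ++ suffix

-- group_by_category: grouped.setdefault(cat, []).append(e) == grouped[cat] = grouped.get(cat, []) + [e]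
def pvGroup (entries : List (List (String × String))) :
    PySem.Dict String (List (List (String × String))) :=
  entries.foldl (fun g e => g.modify (pvCat e) [] (fun l => l ++ [e])) PySem.Dict.empty

-- the lines list A accumulates (header, then per grouped category: '## …', member lines, "")
def pvALines (entries : List (List (String × String))) : List String :=
  (pvGroup entries).items.foldl
    (fun acc p =>
      (p.2.foldl (fun acc2 e => acc2 ++ [pvLine e])
        (acc ++ ["## " ++ pvCategoryZh.getD p.1 p.1])) ++ [""])
    pvHeader

def render_isa_readme_zh (entries : List (List (String × String))) : String :=
  PySem.Str.rstrip (PySem.Str.join "\n" (pvALines entries)) ++ "\n"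

-- ===== PORT B =====
-- _blocks: recursive extract-group over the remaining entries
def pvBlocks : List (List (String × String)) → List String
  | [] => []
  | e :: t =>
    ("## " ++ pvCategoryZh.getD (pvCat e) (pvCat e)) ::
      ((((e :: t).filter (fun x => pvCat x == pvCat e)).map pvLine) ++ [""] ++
        pvBlocks ((e :: t).filter (fun x => !(pvCat x == pvCat e))))
termination_by l => l.length
decreasing_by
  simp only [List.filter_cons, beq_self_eq_true,
    Bool.not_true, Bool.false_eq_true, ↓reduceIte, List.length_cons]
  exact Nat.lt_succ_of_le (List.length_filter_le _ _)

def render_isa_readme_zh_alt (entries : List (List (String × String))) : String :=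
  PySem.Str.rstrip (PySem.Str.join "\n" (pvHeader ++ pvBlocks entries)) ++ "\n"

-- ===== PRECONDITION & SPEC =====
-- Pre_ excludes exactly the inputs where the Python A raises KeyError: an entry without the
-- "instruction" key (B raises there too).
def Pre_render_isa_readme_zh (entries : List (List (String × String))) : Prop :=
  ∀ e ∈ entries, (PySem.Dict.mk e).contains "instruction" = true

instance (entries : List (List (String × String))) : Decidable (Pre_render_isa_readme_zh entries) := by
  unfold Pre_render_isa_readme_zh; infer_instance

def pvWitness_render_isa_readme_zh : (List (List (String × String))) :=
  [[("instruction", "TADD"), ("category", "X")], [("instruction", "TSUB")]]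

def Spec_render_isa_readme_zh (entries : List (List (String × String))) (out : String) : Prop := out = render_isa_readme_zh_alt entries
instance (entries : List (List (String × String))) (out : String) : Decidable (Spec_render_isa_readme_zh entries out) := by unfold Spec_render_isa_readme_zh; infer_instance

-- ===== CLAIM (what is proved, stated in full; the proofs are below) =====
def Claim_equal_render_isa_readme_zh : Prop := ∀ (entries : List (List (String × String))), Dom_render_isa_readme_zh entries → Pre_render_isa_readme_zh entries → Spec_render_isa_readme_zh entries (render_isa_readme_zh entries)

-- ===== LEMMAS AND PROOFS =====

-- first-occurrence dedup, in the same extract-group recursion shape as pvBlocks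
def pvFo : List String → List String
  | [] => []
  | a :: t => a :: pvFo (t.filter (fun x => !(x == a)))
termination_by l => l.length
decreasing_by
  refine Nat.lt_succ_of_le ?_
  simpa using List.length_filter_le _ t.attach

theorem pv_fo_sub : ∀ (l : List String) (k : String), k ∈ pvFo l → k ∈ l := by
  intro l
  induction l using pvFo.induct with
  | case1 => intro k h; simp [pvFo] at h
  | case2 a t ih =>
    intro k h
    rw [pvFo] at h
    rcases List.mem_cons.1 h with h1 | h1
    · simp [h1]
    · simp only [List.unattach_filter, List.unattach_attach] at ih
      right; exact List.mem_of_mem_filter (ih k h1)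

-- PySem.Set.update (a foldl of add) is the recursive first-occurrence dedup
theorem pv_update_eq_fo :
    ∀ (l : List String) (acc : List String),
      PySem.Set.update acc l = acc ++ pvFo (l.filter (fun c => !(acc.contains c))) := by
  intro l
  induction l with
  | nil => intro acc; simp [PySem.Set.update, pvFo]
  | cons a t ih =>
    intro acc
    show PySem.Set.update (PySem.Set.add acc a) t = _
    rw [List.filter_cons]
    by_cases h : acc.contains a = true
    · have hm : a ∈ acc := by simpa using h
      rw [show PySem.Set.add acc a = acc from by simp [PySem.Set.add, PySem.Set.contains, hm]]
      rw [ih acc]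
      simp [hm]
    · have h' : a ∉ acc := by simpa using h
      rw [show PySem.Set.add acc a = acc ++ [a] from by
        simp [PySem.Set.add, PySem.Set.contains, h']]
      rw [ih (acc ++ [a])]
      simp only [h, Bool.not_false, if_pos]
      rw [pvFo, List.append_assoc, List.singleton_append]
      congr 2
      apply congrArg
      rw [List.filter_filter]
      apply List.filter_congr
      intro x _
      by_cases hx : x ∈ acc <;> by_cases hxa : x = a <;> simp [hx, hxa]

-- pointwise congruence for flatMap
theorem pv_flatMap_congr {α β : Type} :
    ∀ (l : List α) (f g : α → List β), (∀ x ∈ l, f x = g x) → l.flatMap f = l.flatMap g := by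
  intro l f g h
  induction l with
  | nil => rfl
  | cons a t ih =>
    simp only [List.flatMap_cons]
    rw [h a (by simp), ih (fun x hx => h x (by simp [hx]))]

-- the block A emits for one category
def pvBlockFor (entries : List (List (String × String))) (c : String) : List String :=
  ("## " ++ pvCategoryZh.getD c c) ::
    ((entries.filter (fun e => pvCat e == c)).map pvLine ++ [""])

-- appending one formatted line at a time is mapping
theorem pv_foldl_push {α β : Type} (f : α → β) :
    ∀ (l : List α) (init : List β),
      l.foldl (fun acc e => acc ++ [f e]) init = init ++ l.map f := by
  intro l
  induction l with
  | nil => simp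
  | cons x xs ih => intro init; simp [List.foldl_cons, ih, List.append_assoc]

-- A's grouping value at a category is the filter of the whole list
theorem pv_getD_group (entries : List (List (String × String))) (c : String) :
    (pvGroup entries).getD c [] = entries.filter (fun e => pvCat e == c) := by
  unfold pvGroup
  have h := PySem.Dict.getD_foldl_modify_append
    (entries.map (fun e => (pvCat e, e))) (PySem.Dict.empty (κ := String)) c
  simp only [List.foldl_map] at h
  rw [h]
  simp [List.filter_map, Function.comp_def]

theorem pv_nodup_keys (entries : List (List (String × String))) :
    (pvGroup entries).keys.Nodup := by
  unfold pvGroup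
  exact PySem.Dict.nodup_keys_foldl_modify_key entries pvCat [] (fun _ e l => l ++ [e])
    PySem.Dict.empty (by simp)

-- A's grouping keys are the recursive first-occurrence dedup of the category list
theorem pv_keys_eq_fo (entries : List (List (String × String))) :
    (pvGroup entries).keys = pvFo (entries.map pvCat) := by
  unfold pvGroup
  rw [PySem.Dict.keys_foldl_modify_key entries pvCat [] (fun _ e l => l ++ [e])]
  rw [show (PySem.Dict.empty (κ := String) (ν := List (List (String × String)))).keys
      = ([] : List String) from rfl]
  rw [pv_update_eq_fo]
  simp

-- A's lines are the header plus the per-key blocks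
theorem pv_alines_flat (entries : List (List (String × String))) :
    pvALines entries
      = pvHeader ++ (pvFo (entries.map pvCat)).flatMap (pvBlockFor entries) := by
  unfold pvALines
  rw [PySem.Dict.items_eq_map_keys (pvGroup entries) (pv_nodup_keys entries) [],
    pv_keys_eq_fo, List.foldl_map]
  have hb : ∀ (acc : List String) (k : String),
      ((((pvGroup entries).getD k []).foldl (fun acc2 e => acc2 ++ [pvLine e])
        (acc ++ ["## " ++ pvCategoryZh.getD k k])) ++ [""])
      = acc ++ pvBlockFor entries k := by
    intro acc k
    rw [pv_foldl_push, pv_getD_group]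
    simp [pvBlockFor]
  calc (pvFo (entries.map pvCat)).foldl
        (fun acc k => (((pvGroup entries).getD k []).foldl (fun acc2 e => acc2 ++ [pvLine e])
          (acc ++ ["## " ++ pvCategoryZh.getD k k])) ++ [""]) pvHeader
      = (pvFo (entries.map pvCat)).foldl
        (fun acc k => acc ++ pvBlockFor entries k) pvHeader := by
        apply List.foldl_ext; intro acc k _; exact hb acc k
    _ = _ := PySem.List.foldl_append_eq_flatMap _ _ _

-- the per-key blocks over the dedup'd categories are exactly B's recursion
theorem pv_flat_eq_blocks :
    ∀ (entries : List (List (String × String))),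
      (pvFo (entries.map pvCat)).flatMap (pvBlockFor entries) = pvBlocks entries := by
  intro entries
  induction entries using pvBlocks.induct with
  | case1 => simp [pvFo, pvBlocks]
  | case2 e t ih =>
    have hmap : (List.map pvCat t).filter (fun x => !(x == pvCat e))
        = List.map pvCat (t.filter (fun x => !(pvCat x == pvCat e))) := by
      rw [List.filter_map]; rfl
    have hother : (e :: t).filter (fun x => !(pvCat x == pvCat e))
        = t.filter (fun x => !(pvCat x == pvCat e)) := by
      simp
    rw [hother] at ih
    rw [pvBlocks, hother, ← ih]
    rw [List.map_cons, pvFo, hmap, List.flatMap_cons]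
    have hcong : ∀ k ∈ pvFo (List.map pvCat (t.filter (fun x => !(pvCat x == pvCat e)))),
        pvBlockFor (e :: t) k = pvBlockFor (t.filter (fun x => !(pvCat x == pvCat e))) k := by
      intro k hk
      have hk' := pv_fo_sub _ _ hk
      obtain ⟨x, hx, hxk⟩ := List.mem_map.1 hk'
      have hne : ¬ (k = pvCat e) := by
        have hxf := List.of_mem_filter hx
        simp at hxf
        rw [← hxk]; exact hxf
      unfold pvBlockFor
      congr 1
      rw [List.filter_cons]
      have hce : (pvCat e == k) = false := by
        simp; intro hc; exact hne hc.symm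
      simp only [hce, Bool.false_eq_true, if_neg, not_false_eq_true]
      have hfil : List.filter (fun e2 => pvCat e2 == k) (List.filter (fun x => !(pvCat x == pvCat e)) t)
          = List.filter (fun e2 => pvCat e2 == k) t := by
        rw [List.filter_filter]
        apply List.filter_congr
        intro y _
        by_cases hy : pvCat y = k
        · simp [hy]; exact hne
        · simp [hy]
      rw [hfil]
    rw [pv_flatMap_congr _ _ _ hcong]
    simp [pvBlockFor, List.append_assoc]

-- ===== VERDICT (by name: the statement is the Claim_ definition above) =====
theorem render_isa_readme_zh_spec : Claim_equal_render_isa_readme_zh := by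
  intro entries _ _
  unfold Spec_render_isa_readme_zh render_isa_readme_zh render_isa_readme_zh_alt
  rw [pv_alines_flat, pv_flat_eq_blocks]
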